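-- pv_equiv track=rewrite | github.com/Nastasia8/AaDS_1_185_2021 | 15.02/15.02.py | spod
-- ===== SOURCE A (Python) =====
-- def spod (sp):
--
--     u = [1 for _ in range(len(sp))]
--     c = []
--     for i in range(len(sp)):
--         a = ""
--         for j in range(i):
--             if sp[i] == sp[j]:
--                 u[i] += 1
--         for _ in range(u[i]):
--             a+=str(sp[i])
--         c.append(a)
--     result = set(c)
--     return   result
-- ===== SOURCE B (Python) =====
-- def spod(sp):
--     cnt = {}
--     c = []
--     for x in sp:
--         k = cnt.get(x, 0) + 1
--         cnt[x] = k
--         c.append(str(x) * k)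
--     return set(c)
-- ===== Notes on version B (the rewrite author's own statement) =====
-- stated objective: faster
-- what changed: Replaces the quadratic per-index rescan of all earlier elements with a single pass keeping a running occurrence counter per value in a dict.
import Mathlib
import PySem

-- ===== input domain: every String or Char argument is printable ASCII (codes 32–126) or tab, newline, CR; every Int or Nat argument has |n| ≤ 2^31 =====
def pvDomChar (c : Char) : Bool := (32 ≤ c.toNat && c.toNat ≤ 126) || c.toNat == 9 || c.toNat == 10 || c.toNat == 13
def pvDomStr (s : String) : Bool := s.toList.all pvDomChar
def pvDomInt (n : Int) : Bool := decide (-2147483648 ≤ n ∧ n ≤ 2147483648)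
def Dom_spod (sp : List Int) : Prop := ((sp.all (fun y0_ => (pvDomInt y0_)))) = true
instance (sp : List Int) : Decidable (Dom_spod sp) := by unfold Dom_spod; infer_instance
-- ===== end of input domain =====

-- B replaces A's quadratic rescan of earlier elements with one pass over a running per-value counter dict (objective: faster).

-- ===== PORT A =====
-- literal port of A: u = [1 for _ in range(n)]; for each i, count equal earlier elements into u[i],
-- build a by repeated 'a += str(sp[i])', append to c; finally set(c)
def spod (sp : List Int) : List String :=
  let u0 : List Int := (PySem.List.pyRange 0 (sp.length : Int) 1).map (fun _ => (1 : Int))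
  let st := (PySem.List.pyRange 0 (sp.length : Int) 1).foldl
    (fun (st : List Int × List String) i =>
      let u1 := (PySem.List.pyRange 0 i 1).foldl (fun u j =>
          if PySem.List.pyGetD sp i 0 == PySem.List.pyGetD sp j 0 then
            PySem.List.pySetD u i (PySem.List.pyGetD u i 0 + 1)
          else u) st.1
      let a := (PySem.List.pyRange 0 (PySem.List.pyGetD u1 i 0) 1).foldl
          (fun a _ => a ++ PySem.Int.toStr (PySem.List.pyGetD sp i 0)) ""
      (u1, st.2 ++ [a])) (u0, [])
  PySem.Set.ofList st.2

-- ===== PORT B =====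
-- str(x) * k : Python string repetition, exact for every k (k ≤ 0 gives "")
def pyStrMul (s : String) (k : Int) : String :=
  String.ofList ((List.replicate k.toNat s.toList).flatten)

-- literal port of B (Source B): one pass, cnt[x] = running occurrence count, c collects str(x)*k; finally set(c)
def spod_alt (sp : List Int) : List String :=
  let st := sp.foldl
    (fun (st : PySem.Dict Int Int × List String) x =>
      let k := st.1.getD x 0 + 1
      (st.1.insert x k, st.2 ++ [pyStrMul (PySem.Int.toStr x) k]))
    (PySem.Dict.empty, [])
  PySem.Set.ofList st.2

-- ===== PRECONDITION & SPEC =====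
def Spec_spod (sp : List Int) (out : List String) : Prop := out = spod_alt sp
instance (sp : List Int) (out : List String) : Decidable (Spec_spod sp out) := by unfold Spec_spod; infer_instance

-- ===== CLAIM (what is proved, stated in full; the proofs are below) =====
def Claim_equal_spod : Prop := ∀ (sp : List Int), Dom_spod sp → Spec_spod sp (spod sp)

-- ===== LEMMAS AND PROOFS =====

-- the common specification: entry k is str(sp[k]) repeated (occurrences of sp[k] among the first k+1 elements)
def cterm (sp : List Int) (k : Nat) : String :=
  pyStrMul (PySem.Int.toStr (sp.getD k 0)) (((sp.take (k+1)).count (sp.getD k 0) : Int))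

def cSpec (sp : List Int) : List String := (List.range sp.length).map (cterm sp)

lemma foldl_append_str {α : Type} (l : List α) (s : String) (a0 : String) :
    l.foldl (fun a _ => a ++ s) a0 = a0 ++ pyStrMul s (l.length : Int) := by
  induction l generalizing a0 with
  | nil => apply String.toList_inj.mp; simp [pyStrMul]
  | cons x xs ih =>
    simp only [List.foldl_cons, ih]
    apply String.toList_inj.mp
    simp [pyStrMul, List.replicate_succ]

lemma inner_fold_set (P : Int → Bool) (js : List Int) (u : List Int) (i : Nat) (h : i < u.length) :
    js.foldl (fun u j => if P j then u.set i (u.getD i 0 + 1) else u) u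
      = u.set i (u.getD i 0 + (js.countP P : Int)) := by
  induction js generalizing u with
  | nil =>
    simp only [List.foldl_nil, List.countP_nil, Nat.cast_zero, add_zero]
    rw [List.getD_eq_getElem _ _ h, List.set_getElem_self]
  | cons j js ih =>
    simp only [List.foldl_cons, List.countP_cons]
    by_cases hp : P j
    · rw [if_pos hp, ih _ (by simpa using h)]
      rw [List.set_set]
      congr 1
      rw [List.getD_eq_getElem _ _ (by simpa using h), List.getElem_set_self]
      rw [List.getD_eq_getElem _ _ h]
      simp [hp]
      ring
    · rw [if_neg hp, ih _ h]
      simp [hp]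

lemma countP_range_eq_count_take (sp : List Int) (x : Int) (i : Nat) (h : i ≤ sp.length) :
    ((PySem.List.pyRange 0 (i : Int) 1).countP (fun j => x == PySem.List.pyGetD sp j 0))
      = (sp.take i).count x := by
  induction i with
  | zero => simp [PySem.List.pyRange_one_eq_nil]
  | succ m ih =>
    have hm : m < sp.length := by omega
    rw [show ((m + 1 : Nat) : Int) = (m : Int) + 1 by push_cast; ring,
        PySem.List.pyRange_one_succ_right (by positivity)]
    rw [List.countP_append, ih (by omega)]
    rw [List.take_add_one]
    simp only [List.count_append, List.countP_cons, List.countP_nil]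
    congr 1
    rw [List.getElem?_eq_getElem hm]
    have hg : PySem.List.pyGetD sp ((m : Nat) : Int) 0 = sp[m] := by
      rw [PySem.List.pyGetD_natCast]
      exact List.getD_eq_getElem _ _ hm
    simp only [hg, Option.toList_some, List.count_singleton]
    rw [Bool.beq_comm]
    omega

lemma count_take_succ (sp : List Int) (i : Nat) (h : i < sp.length) :
    ((sp.take (i+1)).count (sp.getD i 0) : Int) = 1 + ((sp.take i).count (sp.getD i 0) : Int) := by
  rw [List.getD_eq_getElem _ _ h, List.take_add_one, List.getElem?_eq_getElem h]
  rw [List.count_append]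
  simp only [Option.toList_some, List.count_singleton, BEq.rfl, if_true]
  push_cast
  ring

lemma outerA (sp : List Int) : ∀ (m i : Nat) (u : List Int) (c : List String),
    u.length = sp.length → i + m = sp.length →
    (∀ k, i ≤ k → k < sp.length → u.getD k 0 = 1) →
    ((PySem.List.pyRange (i : Int) (sp.length : Int) 1).foldl
      (fun (st : List Int × List String) i =>
        let u1 := (PySem.List.pyRange 0 i 1).foldl (fun u j =>
            if PySem.List.pyGetD sp i 0 == PySem.List.pyGetD sp j 0 then
              PySem.List.pySetD u i (PySem.List.pyGetD u i 0 + 1)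
            else u) st.1
        let a := (PySem.List.pyRange 0 (PySem.List.pyGetD u1 i 0) 1).foldl
            (fun a _ => a ++ PySem.Int.toStr (PySem.List.pyGetD sp i 0)) ""
        (u1, st.2 ++ [a])) (u, c)).2
      = c ++ (List.range m).map (fun t => cterm sp (i + t)) := by
  intro m
  induction m with
  | zero =>
    intro i u c hlen hsum hone
    have hle : ((sp.length : Int)) ≤ (i : Int) := by exact_mod_cast Nat.le_of_eq hsum.symm
    rw [PySem.List.pyRange_one_eq_nil hle]
    simp
  | succ m ih =>
    intro i u c hlen hsum hone
    have hm : i < sp.length := by omega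
    rw [PySem.List.pyRange_one_cons (by exact_mod_cast hm)]
    rw [List.foldl_cons]
    -- reduce the step applied to (u, c)
    have hx : PySem.List.pyGetD sp (i : Int) 0 = sp.getD i 0 := PySem.List.pyGetD_natCast sp i 0
    have hiu : i < u.length := by omega
    have hu1 : ((PySem.List.pyRange 0 (i:Int) 1).foldl (fun u j =>
            if PySem.List.pyGetD sp (i:Int) 0 == PySem.List.pyGetD sp j 0 then
              PySem.List.pySetD u (i:Int) (PySem.List.pyGetD u (i:Int) 0 + 1)
            else u) u)
        = u.set i (1 + ((sp.take i).count (sp.getD i 0) : Int)) := by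
      have : ∀ (v : List Int) (j : Int),
          (if PySem.List.pyGetD sp (i:Int) 0 == PySem.List.pyGetD sp j 0 then
              PySem.List.pySetD v (i:Int) (PySem.List.pyGetD v (i:Int) 0 + 1)
            else v)
          = (if (fun j => PySem.List.pyGetD sp (i:Int) 0 == PySem.List.pyGetD sp j 0) j then
              v.set i (v.getD i 0 + 1) else v) := by
        intro v j
        simp [PySem.List.pySetD_natCast, PySem.List.pyGetD_natCast]
      rw [PySem.List.foldl_congr_mem _ _ _ _ (fun acc x hx => this acc x)]
      rw [inner_fold_set _ _ _ _ hiu]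
      rw [hx, countP_range_eq_count_take sp _ i (by omega)]
      rw [hone i (by omega) hm]
    have hstep_a :
        ((PySem.List.pyRange 0 (PySem.List.pyGetD (u.set i (1 + ((sp.take i).count (sp.getD i 0) : Int))) (i:Int) 0) 1).foldl
            (fun a _ => a ++ PySem.Int.toStr (PySem.List.pyGetD sp (i:Int) 0)) "")
          = cterm sp i := by
      have hg2 : PySem.List.pyGetD (u.set i (1 + ((sp.take i).count (sp.getD i 0) : Int))) (i:Int) 0
          = 1 + ((sp.take i).count (sp.getD i 0) : Int) := by
        rw [PySem.List.pyGetD_natCast]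
        rw [List.getD_eq_getElem _ _ (by simpa using hiu), List.getElem_set_self]
      rw [hg2, foldl_append_str, hx, PySem.List.length_pyRange_one]
      unfold cterm
      rw [count_take_succ sp i hm]
      have hmul : pyStrMul (PySem.Int.toStr (sp.getD i 0)) ((((1 + ((sp.take i).count (sp.getD i 0) : Int)) - 0).toNat : Nat) : Int)
          = pyStrMul (PySem.Int.toStr (sp.getD i 0)) (1 + ((sp.take i).count (sp.getD i 0) : Int)) := by
        simp only [pyStrMul]
        have h2 : ((((1 + ((sp.take i).count (sp.getD i 0) : Int)) - 0).toNat : Nat) : Int).toNat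
            = (1 + ((sp.take i).count (sp.getD i 0) : Int)).toNat := by omega
        rw [h2]
      rw [hmul]
      apply String.toList_inj.mp
      simp
    rw [show ((i:Int) + 1) = (((i+1 : Nat)) : Int) by push_cast; ring]
    -- the step applied to (u, c)
    show ((PySem.List.pyRange ((i+1 : Nat) : Int) (sp.length : Int) 1).foldl _
        (_, c ++ [_])).2 = _
    rw [hu1, hstep_a]
    rw [ih (i+1) _ (c ++ [cterm sp i]) (by simpa using hlen) (by omega) ?_]
    · rw [List.append_assoc]
      congr 1
      rw [List.range_succ_eq_map]
      simp only [List.map_cons, List.map_map, List.singleton_append, Nat.add_zero]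
      congr 1
      apply List.map_congr_left
      intro t _
      simp only [Function.comp_apply]
      congr 1
      omega
    · intro k hk1 hk2
      have hku : k < u.length := by omega
      rw [List.getD_eq_getElem _ _ (by simpa using hku), List.getElem_set_ne (by omega),
          ← List.getD_eq_getElem _ _ hku]
      exact hone k (by omega) hk2

lemma spod_eq_cSpec (sp : List Int) : spod sp = PySem.Set.ofList (cSpec sp) := by
  simp only [spod]
  congr 1
  have h := outerA sp sp.length 0
      ((PySem.List.pyRange 0 (sp.length : Int) 1).map (fun _ => (1 : Int))) []
      (by simp [PySem.List.length_pyRange_one])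
      (by omega)
      (fun k _ hk => by
        rw [List.getD_eq_getElem _ _ (by simpa [PySem.List.length_pyRange_one] using hk)]
        simp)
  rw [show (((0:Nat)):Int) = (0:Int) by simp] at h
  rw [h]
  simp only [List.nil_append, cSpec]
  exact List.map_congr_left (fun t _ => by rw [Nat.zero_add])

lemma cterm_append (xs : List Int) (x : Int) (k : Nat) (h : k < xs.length) :
    cterm (xs ++ [x]) k = cterm xs k := by
  unfold cterm
  rw [List.getD_append _ _ _ _ h, List.take_append_of_le_length (by omega)]

lemma cterm_last (xs : List Int) (x : Int) :
    cterm (xs ++ [x]) xs.length = pyStrMul (PySem.Int.toStr x) ((xs.count x : Int) + 1) := by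
  unfold cterm
  have hg : (xs ++ [x]).getD xs.length 0 = x := by
    rw [List.getD_eq_getElem _ _ (by simp)]
    simp
  rw [hg, List.take_of_length_le (by simp)]
  simp

lemma cSpec_append (xs : List Int) (x : Int) :
    cSpec (xs ++ [x]) = cSpec xs ++ [pyStrMul (PySem.Int.toStr x) ((xs.count x : Int) + 1)] := by
  unfold cSpec
  rw [List.length_append, List.length_singleton, List.range_succ, List.map_append]
  congr 1
  · exact List.map_congr_left (fun k hk => cterm_append xs x k (List.mem_range.mp hk))
  · simp [cterm_last]

lemma fstB (l : List Int) (d : PySem.Dict Int Int) (c : List String) :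
    (l.foldl (fun (st : PySem.Dict Int Int × List String) x =>
      (st.1.insert x (st.1.getD x 0 + 1), st.2 ++ [pyStrMul (PySem.Int.toStr x) (st.1.getD x 0 + 1)])) (d, c)).1
      = l.foldl (fun d x => d.insert x (d.getD x 0 + 1)) d := by
  induction l generalizing d c with
  | nil => rfl
  | cons y ys ih => simpa using ih _ _

lemma spod_alt_eq_cSpec (sp : List Int) : spod_alt sp = PySem.Set.ofList (cSpec sp) := by
  simp only [spod_alt]
  congr 1
  induction sp using List.reverseRecOn with
  | nil => rfl
  | append_singleton xs x ih =>
    rw [List.foldl_append]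
    simp only [List.foldl_cons, List.foldl_nil]
    rw [cSpec_append, ← ih]
    congr 2
    rw [fstB]
    rw [PySem.Dict.getD_foldl_insert_add_one]
    simp [PySem.Dict.getD_empty]

-- ===== VERDICT =====
theorem spod_spec : Claim_equal_spod := by
  intro sp _
  unfold Spec_spod
  rw [spod_eq_cSpec, spod_alt_eq_cSpec]
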